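-- pv_equiv track=rewrite | github.com/cipgen/MWhisper | src/settings_window.py | _format_hotkey
-- ===== SOURCE A (Python) =====
-- def _format_hotkey(hotkey: str) -> str:
--     """Format hotkey for display"""
--     mapping = {
--         '<cmd>': '⌘',
--         '<shift>': '⇧',
--         '<ctrl>': '⌃',
--         '<alt>': '⌥',
--     }
--     result = hotkey.lower()
--     for key, symbol in mapping.items():
--         result = result.replace(key, symbol)
--     result = result.replace('+', '')
--     return result.upper()
-- ===== SOURCE B (Python) =====
-- _KEYS = (('<cmd>', '\u2318'), ('<shift>', '\u21e7'), ('<ctrl>', '\u2303'), ('<alt>', '\u2325'))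
--
-- def _format_hotkey(hotkey: str) -> str:
--     """Single left-to-right scan: emit a symbol for each modifier key, drop '+',
--     and uppercase ordinary characters as it goes."""
--     s = hotkey.lower()
--     out = []
--     i = 0
--     n = len(s)
--     while i < n:
--         for key, sym in _KEYS:
--             if s.startswith(key, i):
--                 out.append(sym)
--                 i += len(key)
--                 break
--         else:
--             c = s[i]
--             if c != '+':
--                 out.append(c.upper())
--             i += 1
--     return ''.join(out)
-- ===== Notes on version B (the rewrite author's own statement) =====
-- stated objective: alternative
-- what changed: Replaced A's five sequential full-string replace passes (plus a final uppercase pass) by a single left-to-right scan that matches the four modifier keys at each position, emits the symbol, drops the plus separators and uppercases ordinary characters as it goes.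
import Mathlib
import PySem

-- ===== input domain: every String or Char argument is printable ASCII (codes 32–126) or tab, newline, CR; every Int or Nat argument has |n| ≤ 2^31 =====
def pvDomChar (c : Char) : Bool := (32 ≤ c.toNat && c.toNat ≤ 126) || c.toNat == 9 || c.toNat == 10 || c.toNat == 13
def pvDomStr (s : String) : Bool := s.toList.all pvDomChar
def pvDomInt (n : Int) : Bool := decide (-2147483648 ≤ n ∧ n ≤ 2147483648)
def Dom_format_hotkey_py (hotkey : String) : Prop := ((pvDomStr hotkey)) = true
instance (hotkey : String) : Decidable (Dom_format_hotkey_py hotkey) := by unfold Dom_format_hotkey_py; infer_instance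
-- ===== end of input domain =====

-- B replaces A's five sequential full-string .replace passes by one left-to-right scan that
-- emits a symbol per modifier key, drops '+' and uppercases as it goes (objective: alternative).

-- ===== PORT A =====
def format_hotkey_py (hotkey : String) : String :=
  let result := PySem.Str.lower hotkey
  let result := PySem.Str.replace result "<cmd>" "⌘"
  let result := PySem.Str.replace result "<shift>" "⇧"
  let result := PySem.Str.replace result "<ctrl>" "⌃"
  let result := PySem.Str.replace result "<alt>" "⌥"
  let result := PySem.Str.replace result "+" ""
  PySem.Str.upper result

-- ===== PORT B =====
-- the single left-to-right scan of Source B, over the lowered character list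
def pvScanB : List Char → List Char
  | [] => []
  | c :: t =>
    if PySem.Chars.startswith (c :: t) ['<','c','m','d','>'] then
      '⌘' :: pvScanB ((c :: t).drop 5)
    else if PySem.Chars.startswith (c :: t) ['<','s','h','i','f','t','>'] then
      '⇧' :: pvScanB ((c :: t).drop 7)
    else if PySem.Chars.startswith (c :: t) ['<','c','t','r','l','>'] then
      '⌃' :: pvScanB ((c :: t).drop 6)
    else if PySem.Chars.startswith (c :: t) ['<','a','l','t','>'] then
      '⌥' :: pvScanB ((c :: t).drop 5)
    else if c = '+' then pvScanB t
    else PySem.Chars.upperChar c :: pvScanB t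
  termination_by cs => cs.length
  decreasing_by all_goals simp [List.length_drop]

def format_hotkey_py_alt (hotkey : String) : String :=
  String.ofList (pvScanB (PySem.Chars.lower hotkey.toList))

-- ===== PRECONDITION & SPEC =====
def Spec_format_hotkey_py (hotkey : String) (out : String) : Prop := out = format_hotkey_py_alt hotkey
instance (hotkey : String) (out : String) : Decidable (Spec_format_hotkey_py hotkey out) := by unfold Spec_format_hotkey_py; infer_instance

-- ===== CLAIM (what is proved, stated in full; the proofs are below) =====
def Claim_equal_format_hotkey_py : Prop := ∀ (hotkey : String), Dom_format_hotkey_py hotkey → Spec_format_hotkey_py hotkey (format_hotkey_py hotkey)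

-- ===== LEMMAS AND PROOFS =====

-- the four modifier keys, and the suffix of A's replace chain after each stage
def pvK1 : List Char := ['<','c','m','d','>']
def pvK2 : List Char := ['<','s','h','i','f','t','>']
def pvK3 : List Char := ['<','c','t','r','l','>']
def pvK4 : List Char := ['<','a','l','t','>']

def pvChain5 (X : List Char) : List Char := PySem.Chars.upper (PySem.Chars.replace X ['+'] [])
def pvChain4 (X : List Char) : List Char := pvChain5 (PySem.Chars.replace X pvK4 ['⌥'])
def pvChain3 (X : List Char) : List Char := pvChain4 (PySem.Chars.replace X pvK3 ['⌃'])
def pvChain2 (X : List Char) : List Char := pvChain3 (PySem.Chars.replace X pvK2 ['⇧'])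
def pvChain1 (X : List Char) : List Char := pvChain2 (PySem.Chars.replace X pvK1 ['⌘'])

theorem pv_go_acc (old new : List Char) : ∀ (fuel : Nat) (l acc : List Char),
    PySem.Chars.replace.go old new fuel l acc = acc.reverse ++ PySem.Chars.replace.go old new fuel l [] := by
  intro fuel
  induction fuel with
  | zero => intro l acc; simp [PySem.Chars.replace.go]
  | succ n ih =>
    intro l acc
    cases l with
    | nil => simp [PySem.Chars.replace.go]
    | cons c t =>
      rw [PySem.Chars.replace.go, PySem.Chars.replace.go]
      by_cases h : old.isPrefixOf (c::t)
      · simp only [h, if_true]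
        rw [ih (List.drop old.length (c::t)) (new.reverse ++ acc),
            ih (List.drop old.length (c::t)) (new.reverse ++ [])]
        simp
      · simp only [h]
        rw [ih t (c::acc), ih t (c::[])]
        simp

theorem pv_drop_len (old : List Char) (hold : old ≠ []) (c : Char) (t : List Char) :
    (List.drop old.length (c::t)).length ≤ t.length := by
  cases old with
  | nil => exact absurd rfl hold
  | cons o os => simp

theorem pv_go_fuel (old new : List Char) (hold : old ≠ []) : ∀ (n : Nat) (l : List Char) (fuel fuel' : Nat),
    l.length ≤ n → l.length ≤ fuel → l.length ≤ fuel' →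
    PySem.Chars.replace.go old new fuel l [] = PySem.Chars.replace.go old new fuel' l [] := by
  intro n
  induction n with
  | zero =>
    intro l fuel fuel' hn _ _
    have : l = [] := List.eq_nil_of_length_eq_zero (Nat.le_zero.mp hn)
    subst this
    cases fuel <;> cases fuel' <;> simp [PySem.Chars.replace.go]
  | succ n ih =>
    intro l fuel fuel' hn hf hf'
    cases l with
    | nil => cases fuel <;> cases fuel' <;> simp [PySem.Chars.replace.go]
    | cons c t =>
      simp only [List.length_cons] at hn hf hf'
      obtain ⟨f, rfl⟩ : ∃ f, fuel = f + 1 := ⟨fuel - 1, by omega⟩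
      obtain ⟨f', rfl⟩ : ∃ f', fuel' = f' + 1 := ⟨fuel' - 1, by omega⟩
      rw [PySem.Chars.replace.go, PySem.Chars.replace.go]
      have hd := pv_drop_len old hold c t
      by_cases h : old.isPrefixOf (c::t)
      · simp only [h, if_true]
        rw [pv_go_acc, pv_go_acc old new f']
        rw [ih (List.drop old.length (c::t)) f f' (by omega) (by omega) (by omega)]
      · simp only [h, Bool.false_eq_true, if_false]
        rw [pv_go_acc, pv_go_acc old new f']
        rw [ih t f f' (by omega) (by omega) (by omega)]

theorem pv_old_ne_isEmpty (old : List Char) (hold : old ≠ []) : old.isEmpty = false := by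
  cases old with
  | nil => exact absurd rfl hold
  | cons o os => rfl

theorem pv_replace_nil (old new : List Char) (hold : old ≠ []) :
    PySem.Chars.replace [] old new = [] := by
  rw [PySem.Chars.replace, pv_old_ne_isEmpty old hold]
  simp [PySem.Chars.replace.go]

theorem pv_replace_cons_not_prefix (old new : List Char) (c : Char) (t : List Char)
    (hold : old ≠ []) (h : ¬ old.isPrefixOf (c::t)) :
    PySem.Chars.replace (c::t) old new = c :: PySem.Chars.replace t old new := by
  rw [PySem.Chars.replace, PySem.Chars.replace, pv_old_ne_isEmpty old hold]
  simp only [Bool.false_eq_true, if_false, List.length_cons]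
  rw [PySem.Chars.replace.go]
  simp only [h, Bool.false_eq_true, if_false]
  rw [pv_go_acc]
  simp

theorem pv_replace_cons_prefix (old new : List Char) (c : Char) (t : List Char)
    (hold : old ≠ []) (h : old.isPrefixOf (c::t)) :
    PySem.Chars.replace (c::t) old new = new ++ PySem.Chars.replace (List.drop old.length (c::t)) old new := by
  rw [PySem.Chars.replace, PySem.Chars.replace, pv_old_ne_isEmpty old hold]
  simp only [Bool.false_eq_true, if_false, List.length_cons]
  rw [PySem.Chars.replace.go]
  simp only [h, if_true]
  rw [pv_go_acc]
  have hd := pv_drop_len old hold c t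
  rw [pv_go_fuel old new hold t.length (List.drop old.length (c::t)) t.length
        (List.drop old.length (c::t)).length hd (by omega) (le_refl _)]
  simp

theorem pv_prefix_of_replace (old : List Char) (a : Char)
    (hold : old ≠ []) : ∀ (n : Nat) (t p : List Char), t.length ≤ n → a ∉ p →
    p <+: PySem.Chars.replace t old [a] → p <+: t := by
  intro n
  induction n with
  | zero =>
    intro t p hn ha hp
    have : t = [] := List.eq_nil_of_length_eq_zero (Nat.le_zero.mp hn)
    subst this
    rwa [pv_replace_nil old [a] hold] at hp
  | succ n ih =>
    intro t p hn ha hp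
    cases t with
    | nil => rwa [pv_replace_nil old [a] hold] at hp
    | cons c t' =>
      by_cases h : old.isPrefixOf (c::t')
      · rw [pv_replace_cons_prefix old [a] c t' hold h] at hp
        cases p with
        | nil => exact List.nil_prefix
        | cons q qs =>
          exfalso
          obtain ⟨u, hu⟩ := hp
          simp at hu
          exact ha (by simp [hu.1])
      · rw [pv_replace_cons_not_prefix old [a] c t' hold h] at hp
        cases p with
        | nil => exact List.nil_prefix
        | cons q qs =>
          obtain ⟨u, hu⟩ := hp
          simp at hu
          obtain ⟨rfl, hu2⟩ := hu
          have hqs : qs <+: PySem.Chars.replace t' old [a] := ⟨u, hu2⟩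
          have hha : a ∉ qs := fun hm => ha (List.mem_cons_of_mem _ hm)
          have := ih t' qs (by simp at hn; omega) hha hqs
          exact List.cons_prefix_cons.mpr ⟨rfl, this⟩



theorem pvChain5_cons (d : Char) (X : List Char) (hp : d ≠ '+') :
    pvChain5 (d::X) = PySem.Chars.upperChar d :: pvChain5 X := by
  unfold pvChain5
  rw [pv_replace_cons_not_prefix _ _ _ _ (by decide)
        (by simp [List.isPrefixOf]; exact fun h => absurd h.symm hp)]
  simp [PySem.Chars.upper]

theorem pvChain5_plus (X : List Char) : pvChain5 ('+'::X) = pvChain5 X := by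
  unfold pvChain5
  rw [pv_replace_cons_prefix _ _ _ _ (by decide) (by simp [List.isPrefixOf])]
  simp

theorem pvChain4_cons (d : Char) (X : List Char) (hlt : d ≠ '<') (hp : d ≠ '+') :
    pvChain4 (d::X) = PySem.Chars.upperChar d :: pvChain4 X := by
  unfold pvChain4
  rw [pv_replace_cons_not_prefix _ _ _ _ (by decide)
        (by simp [pvK4, List.isPrefixOf]; exact fun h => absurd h.symm hlt)]
  exact pvChain5_cons d _ hp

theorem pvChain3_cons (d : Char) (X : List Char) (hlt : d ≠ '<') (hp : d ≠ '+') :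
    pvChain3 (d::X) = PySem.Chars.upperChar d :: pvChain3 X := by
  unfold pvChain3
  rw [pv_replace_cons_not_prefix _ _ _ _ (by decide)
        (by simp [pvK3, List.isPrefixOf]; exact fun h => absurd h.symm hlt)]
  exact pvChain4_cons d _ hlt hp

theorem pvChain2_cons (d : Char) (X : List Char) (hlt : d ≠ '<') (hp : d ≠ '+') :
    pvChain2 (d::X) = PySem.Chars.upperChar d :: pvChain2 X := by
  unfold pvChain2
  rw [pv_replace_cons_not_prefix _ _ _ _ (by decide)
        (by simp [pvK2, List.isPrefixOf]; exact fun h => absurd h.symm hlt)]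
  exact pvChain3_cons d _ hlt hp

theorem pv_chain1_nil : pvChain1 [] = [] := by
  unfold pvChain1 pvChain2 pvChain3 pvChain4 pvChain5
  rw [pv_replace_nil _ _ (by decide : pvK1 ≠ []), pv_replace_nil _ _ (by decide : pvK2 ≠ []),
      pv_replace_nil _ _ (by decide : pvK3 ≠ []), pv_replace_nil _ _ (by decide : pvK4 ≠ []),
      pv_replace_nil ['+'] [] (by decide)]
  rfl

theorem pv_main : ∀ (n : Nat) (cs : List Char), cs.length ≤ n → pvChain1 cs = pvScanB cs := by
  intro n
  induction n with
  | zero =>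
    intro cs hn
    have : cs = [] := List.eq_nil_of_length_eq_zero (Nat.le_zero.mp hn)
    subst this
    rw [pv_chain1_nil]
    simp [pvScanB]
  | succ n ih =>
    intro cs hn
    by_cases h1 : pvK1.isPrefixOf cs
    · obtain ⟨rest, rfl⟩ := List.isPrefixOf_iff_prefix.mp h1
      have ep : PySem.Chars.replace ('<'::'c'::'m'::'d'::'>'::rest) pvK1 ['⌘'] =
          '⌘' :: PySem.Chars.replace rest pvK1 ['⌘'] := by
        rw [pv_replace_cons_prefix _ _ _ _ (by decide) (by simp [pvK1, List.isPrefixOf])]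
        simp [pvK1]
      have lhs : pvChain1 (pvK1 ++ rest) = '⌘' :: pvChain1 rest := by
        rw [show pvK1 ++ rest = '<'::'c'::'m'::'d'::'>'::rest from rfl, pvChain1, ep, pvChain2_cons _ _ (by decide) (by decide)]
        rfl
      rw [lhs, ih rest (by simp [pvK1] at hn; omega)]
      rw [show pvK1 ++ rest = '<'::'c'::'m'::'d'::'>'::rest from rfl]
      simp [pvScanB, PySem.Chars.startswith, List.isPrefixOf, List.drop]
    · by_cases h2 : pvK2.isPrefixOf cs
      · obtain ⟨rest, rfl⟩ := List.isPrefixOf_iff_prefix.mp h2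
        have e1 : PySem.Chars.replace ('<'::'s'::'h'::'i'::'f'::'t'::'>'::rest) pvK1 ['⌘'] =
            '<'::'s'::'h'::'i'::'f'::'t'::'>'::(PySem.Chars.replace rest pvK1 ['⌘']) := by
          rw [pv_replace_cons_not_prefix _ _ _ _ (by decide) (by simp [pvK1, List.isPrefixOf]),
              pv_replace_cons_not_prefix _ _ _ _ (by decide) (by simp [pvK1, List.isPrefixOf]),
              pv_replace_cons_not_prefix _ _ _ _ (by decide) (by simp [pvK1, List.isPrefixOf]),
              pv_replace_cons_not_prefix _ _ _ _ (by decide) (by simp [pvK1, List.isPrefixOf]),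
              pv_replace_cons_not_prefix _ _ _ _ (by decide) (by simp [pvK1, List.isPrefixOf]),
              pv_replace_cons_not_prefix _ _ _ _ (by decide) (by simp [pvK1, List.isPrefixOf]),
              pv_replace_cons_not_prefix _ _ _ _ (by decide) (by simp [pvK1, List.isPrefixOf])]
        have ep : PySem.Chars.replace ('<'::'s'::'h'::'i'::'f'::'t'::'>'::(PySem.Chars.replace rest pvK1 ['⌘'])) pvK2 ['⇧'] =
            '⇧' :: PySem.Chars.replace (PySem.Chars.replace rest pvK1 ['⌘']) pvK2 ['⇧'] := by
          rw [pv_replace_cons_prefix _ _ _ _ (by decide) (by simp [pvK2, List.isPrefixOf])]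
          simp [pvK2]
        have lhs : pvChain1 (pvK2 ++ rest) = '⇧' :: pvChain1 rest := by
          rw [show pvK2 ++ rest = '<'::'s'::'h'::'i'::'f'::'t'::'>'::rest from rfl, pvChain1, e1, pvChain2, ep, pvChain3_cons _ _ (by decide) (by decide)]
          rfl
        rw [lhs, ih rest (by simp [pvK2] at hn; omega)]
        rw [show pvK2 ++ rest = '<'::'s'::'h'::'i'::'f'::'t'::'>'::rest from rfl]
        simp [pvScanB, PySem.Chars.startswith, List.isPrefixOf, List.drop]
      · by_cases h3 : pvK3.isPrefixOf cs
        · obtain ⟨rest, rfl⟩ := List.isPrefixOf_iff_prefix.mp h3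
          have e1 : PySem.Chars.replace ('<'::'c'::'t'::'r'::'l'::'>'::rest) pvK1 ['⌘'] =
              '<'::'c'::'t'::'r'::'l'::'>'::(PySem.Chars.replace rest pvK1 ['⌘']) := by
            rw [pv_replace_cons_not_prefix _ _ _ _ (by decide) (by simp [pvK1, List.isPrefixOf]),
                pv_replace_cons_not_prefix _ _ _ _ (by decide) (by simp [pvK1, List.isPrefixOf]),
                pv_replace_cons_not_prefix _ _ _ _ (by decide) (by simp [pvK1, List.isPrefixOf]),
                pv_replace_cons_not_prefix _ _ _ _ (by decide) (by simp [pvK1, List.isPrefixOf]),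
                pv_replace_cons_not_prefix _ _ _ _ (by decide) (by simp [pvK1, List.isPrefixOf]),
                pv_replace_cons_not_prefix _ _ _ _ (by decide) (by simp [pvK1, List.isPrefixOf])]
          have e2 : PySem.Chars.replace ('<'::'c'::'t'::'r'::'l'::'>'::(PySem.Chars.replace rest pvK1 ['⌘'])) pvK2 ['⇧'] =
              '<'::'c'::'t'::'r'::'l'::'>'::(PySem.Chars.replace (PySem.Chars.replace rest pvK1 ['⌘']) pvK2 ['⇧']) := by
            rw [pv_replace_cons_not_prefix _ _ _ _ (by decide) (by simp [pvK2, List.isPrefixOf]),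
                pv_replace_cons_not_prefix _ _ _ _ (by decide) (by simp [pvK2, List.isPrefixOf]),
                pv_replace_cons_not_prefix _ _ _ _ (by decide) (by simp [pvK2, List.isPrefixOf]),
                pv_replace_cons_not_prefix _ _ _ _ (by decide) (by simp [pvK2, List.isPrefixOf]),
                pv_replace_cons_not_prefix _ _ _ _ (by decide) (by simp [pvK2, List.isPrefixOf]),
                pv_replace_cons_not_prefix _ _ _ _ (by decide) (by simp [pvK2, List.isPrefixOf])]
          have ep : PySem.Chars.replace ('<'::'c'::'t'::'r'::'l'::'>'::(PySem.Chars.replace (PySem.Chars.replace rest pvK1 ['⌘']) pvK2 ['⇧'])) pvK3 ['⌃'] =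
              '⌃' :: PySem.Chars.replace (PySem.Chars.replace (PySem.Chars.replace rest pvK1 ['⌘']) pvK2 ['⇧']) pvK3 ['⌃'] := by
            rw [pv_replace_cons_prefix _ _ _ _ (by decide) (by simp [pvK3, List.isPrefixOf])]
            simp [pvK3]
          have lhs : pvChain1 (pvK3 ++ rest) = '⌃' :: pvChain1 rest := by
            rw [show pvK3 ++ rest = '<'::'c'::'t'::'r'::'l'::'>'::rest from rfl, pvChain1, e1, pvChain2, e2, pvChain3, ep, pvChain4_cons _ _ (by decide) (by decide)]
            rfl
          rw [lhs, ih rest (by simp [pvK3] at hn; omega)]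
          rw [show pvK3 ++ rest = '<'::'c'::'t'::'r'::'l'::'>'::rest from rfl]
          simp [pvScanB, PySem.Chars.startswith, List.isPrefixOf, List.drop]
        · by_cases h4 : pvK4.isPrefixOf cs
          · obtain ⟨rest, rfl⟩ := List.isPrefixOf_iff_prefix.mp h4
            have e1 : PySem.Chars.replace ('<'::'a'::'l'::'t'::'>'::rest) pvK1 ['⌘'] =
                '<'::'a'::'l'::'t'::'>'::(PySem.Chars.replace rest pvK1 ['⌘']) := by
              rw [pv_replace_cons_not_prefix _ _ _ _ (by decide) (by simp [pvK1, List.isPrefixOf]),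
                  pv_replace_cons_not_prefix _ _ _ _ (by decide) (by simp [pvK1, List.isPrefixOf]),
                  pv_replace_cons_not_prefix _ _ _ _ (by decide) (by simp [pvK1, List.isPrefixOf]),
                  pv_replace_cons_not_prefix _ _ _ _ (by decide) (by simp [pvK1, List.isPrefixOf]),
                  pv_replace_cons_not_prefix _ _ _ _ (by decide) (by simp [pvK1, List.isPrefixOf])]
            have e2 : PySem.Chars.replace ('<'::'a'::'l'::'t'::'>'::(PySem.Chars.replace rest pvK1 ['⌘'])) pvK2 ['⇧'] =
                '<'::'a'::'l'::'t'::'>'::(PySem.Chars.replace (PySem.Chars.replace rest pvK1 ['⌘']) pvK2 ['⇧']) := by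
              rw [pv_replace_cons_not_prefix _ _ _ _ (by decide) (by simp [pvK2, List.isPrefixOf]),
                  pv_replace_cons_not_prefix _ _ _ _ (by decide) (by simp [pvK2, List.isPrefixOf]),
                  pv_replace_cons_not_prefix _ _ _ _ (by decide) (by simp [pvK2, List.isPrefixOf]),
                  pv_replace_cons_not_prefix _ _ _ _ (by decide) (by simp [pvK2, List.isPrefixOf]),
                  pv_replace_cons_not_prefix _ _ _ _ (by decide) (by simp [pvK2, List.isPrefixOf])]
            have e3 : PySem.Chars.replace ('<'::'a'::'l'::'t'::'>'::(PySem.Chars.replace (PySem.Chars.replace rest pvK1 ['⌘']) pvK2 ['⇧'])) pvK3 ['⌃'] =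
                '<'::'a'::'l'::'t'::'>'::(PySem.Chars.replace (PySem.Chars.replace (PySem.Chars.replace rest pvK1 ['⌘']) pvK2 ['⇧']) pvK3 ['⌃']) := by
              rw [pv_replace_cons_not_prefix _ _ _ _ (by decide) (by simp [pvK3, List.isPrefixOf]),
                  pv_replace_cons_not_prefix _ _ _ _ (by decide) (by simp [pvK3, List.isPrefixOf]),
                  pv_replace_cons_not_prefix _ _ _ _ (by decide) (by simp [pvK3, List.isPrefixOf]),
                  pv_replace_cons_not_prefix _ _ _ _ (by decide) (by simp [pvK3, List.isPrefixOf]),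
                  pv_replace_cons_not_prefix _ _ _ _ (by decide) (by simp [pvK3, List.isPrefixOf])]
            have ep : PySem.Chars.replace ('<'::'a'::'l'::'t'::'>'::(PySem.Chars.replace (PySem.Chars.replace (PySem.Chars.replace rest pvK1 ['⌘']) pvK2 ['⇧']) pvK3 ['⌃'])) pvK4 ['⌥'] =
                '⌥' :: PySem.Chars.replace (PySem.Chars.replace (PySem.Chars.replace (PySem.Chars.replace rest pvK1 ['⌘']) pvK2 ['⇧']) pvK3 ['⌃']) pvK4 ['⌥'] := by
              rw [pv_replace_cons_prefix _ _ _ _ (by decide) (by simp [pvK4, List.isPrefixOf])]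
              simp [pvK4]
            have lhs : pvChain1 (pvK4 ++ rest) = '⌥' :: pvChain1 rest := by
              rw [show pvK4 ++ rest = '<'::'a'::'l'::'t'::'>'::rest from rfl, pvChain1, e1, pvChain2, e2, pvChain3, e3, pvChain4, ep, pvChain5_cons _ _ (by decide)]
              rfl
            rw [lhs, ih rest (by simp [pvK4] at hn; omega)]
            rw [show pvK4 ++ rest = '<'::'a'::'l'::'t'::'>'::rest from rfl]
            simp [pvScanB, PySem.Chars.startswith, List.isPrefixOf, List.drop]
          cases cs with
          | nil =>
            rw [pv_chain1_nil]
            simp [pvScanB]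
          | cons c t =>
            simp only [List.length_cons] at hn
            by_cases hplus : c = '+'
            · subst hplus
              have lhs : pvChain1 ('+'::t) = pvChain1 t := by
                rw [pvChain1, pv_replace_cons_not_prefix _ _ _ _ (by decide) (by simp [pvK1, List.isPrefixOf]),
                    pvChain2, pv_replace_cons_not_prefix _ _ _ _ (by decide) (by simp [pvK2, List.isPrefixOf]),
                    pvChain3, pv_replace_cons_not_prefix _ _ _ _ (by decide) (by simp [pvK3, List.isPrefixOf]),
                    pvChain4, pv_replace_cons_not_prefix _ _ _ _ (by decide) (by simp [pvK4, List.isPrefixOf]),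
                    pvChain5_plus]
                rfl
              rw [lhs, ih t (by omega)]
              simp [pvScanB, PySem.Chars.startswith, List.isPrefixOf]
            · have np1 : ¬ pvK1.isPrefixOf (c::t) := h1
              have np2 : ¬ pvK2.isPrefixOf (c :: PySem.Chars.replace t pvK1 ['⌘']) := by
                intro hp
                apply h2
                rw [List.isPrefixOf_iff_prefix] at hp ⊢
                simp only [pvK2] at hp ⊢
                obtain ⟨he, htail⟩ := List.cons_prefix_cons.mp hp
                have s1 := pv_prefix_of_replace pvK1 '⌘' (by decide) t.length t _ le_rfl (by decide) htail
                exact List.cons_prefix_cons.mpr ⟨he, s1⟩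
              have np3 : ¬ pvK3.isPrefixOf (c :: PySem.Chars.replace (PySem.Chars.replace t pvK1 ['⌘']) pvK2 ['⇧']) := by
                intro hp
                apply h3
                rw [List.isPrefixOf_iff_prefix] at hp ⊢
                simp only [pvK3] at hp ⊢
                obtain ⟨he, htail⟩ := List.cons_prefix_cons.mp hp
                have s1 := pv_prefix_of_replace pvK2 '⇧' (by decide) _ _ _ le_rfl (by decide) htail
                have s2 := pv_prefix_of_replace pvK1 '⌘' (by decide) t.length t _ le_rfl (by decide) s1
                exact List.cons_prefix_cons.mpr ⟨he, s2⟩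
              have np4 : ¬ pvK4.isPrefixOf (c :: PySem.Chars.replace (PySem.Chars.replace (PySem.Chars.replace t pvK1 ['⌘']) pvK2 ['⇧']) pvK3 ['⌃']) := by
                intro hp
                apply h4
                rw [List.isPrefixOf_iff_prefix] at hp ⊢
                simp only [pvK4] at hp ⊢
                obtain ⟨he, htail⟩ := List.cons_prefix_cons.mp hp
                have s1 := pv_prefix_of_replace pvK3 '⌃' (by decide) _ _ _ le_rfl (by decide) htail
                have s2 := pv_prefix_of_replace pvK2 '⇧' (by decide) _ _ _ le_rfl (by decide) s1
                have s3 := pv_prefix_of_replace pvK1 '⌘' (by decide) t.length t _ le_rfl (by decide) s2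
                exact List.cons_prefix_cons.mpr ⟨he, s3⟩
              have lhs : pvChain1 (c::t) = PySem.Chars.upperChar c :: pvChain1 t := by
                rw [pvChain1, pv_replace_cons_not_prefix _ _ _ _ (by decide) np1,
                    pvChain2, pv_replace_cons_not_prefix _ _ _ _ (by decide) np2,
                    pvChain3, pv_replace_cons_not_prefix _ _ _ _ (by decide) np3,
                    pvChain4, pv_replace_cons_not_prefix _ _ _ _ (by decide) np4,
                    pvChain5_cons _ _ hplus]
                rfl
              rw [lhs, ih t (by omega)]
              have hb1 : List.isPrefixOf ['<','c','m','d','>'] (c::t) = false := by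
                rw [Bool.eq_false_iff]
                simpa [pvK1] using h1
              have hb2 : List.isPrefixOf ['<','s','h','i','f','t','>'] (c::t) = false := by
                rw [Bool.eq_false_iff]
                simpa [pvK2] using h2
              have hb3 : List.isPrefixOf ['<','c','t','r','l','>'] (c::t) = false := by
                rw [Bool.eq_false_iff]
                simpa [pvK3] using h3
              have hb4 : List.isPrefixOf ['<','a','l','t','>'] (c::t) = false := by
                rw [Bool.eq_false_iff]
                simpa [pvK4] using h4
              simp [pvScanB, PySem.Chars.startswith, hb1, hb2, hb3, hb4, hplus]

-- ===== VERDICT (by name: the statement is the Claim_ definition above) =====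
theorem format_hotkey_py_spec : Claim_equal_format_hotkey_py := by
  unfold Claim_equal_format_hotkey_py
  intro hotkey _
  unfold Spec_format_hotkey_py
  apply String.toList_inj.mp
  have hb : (format_hotkey_py hotkey).toList =
      pvChain1 (PySem.Chars.lower hotkey.toList) := by
    simp [format_hotkey_py, pvChain1, pvChain2, pvChain3, pvChain4, pvChain5,
          pvK1, pvK2, pvK3, pvK4]
  rw [hb, pv_main (PySem.Chars.lower hotkey.toList).length _ le_rfl]
  simp [format_hotkey_py_alt]
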